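-- pv_equiv track=rewrite | github.com/roiei/algo | leet_code/1177. Can Make Palindrome from Substring.py | can_make_palindrome
-- ===== SOURCE A (Python) =====
-- import collections
-- from typing import List
--
-- def can_make_palindrome(s: str, requests: List[List[int]]) -> List[bool]:
--     dp = [collections.Counter()]
--
--     for i in range(len(s)):
--         dp += dp[-1] + collections.Counter(s[i]),
--
--     res = []
--     for l, r, k in requests:
--         req = dp[r + 1] - dp[l]
--         need = sum(v%2 for v in req.values())//2
--         res += need <= k,
--
--     return res
-- ===== SOURCE B (Python) =====
-- def can_make_palindrome(s, requests):
--     res = []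
--     for l, r, k in requests:
--         sub = s[l:r + 1]
--         odd = sum(sub.count(c) % 2 for c in set(sub))
--         res.append(odd // 2 <= k)
--     return res
-- ===== Notes on version B (the rewrite author's own statement) =====
-- stated objective: simpler
-- what changed: Drops A's precomputed list of prefix Counters and per-query Counter subtraction entirely: each query is answered on its own by slicing the substring and counting its characters with odd multiplicity.
-- outside the precondition, e.g. on can_make_palindrome('abc', [[-3, 1, 0]]): A returns [True], B returns [False]; on can_make_palindrome('ab', [[0, -2, 0]]): A returns [False], B returns [True]
import Mathlib
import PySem

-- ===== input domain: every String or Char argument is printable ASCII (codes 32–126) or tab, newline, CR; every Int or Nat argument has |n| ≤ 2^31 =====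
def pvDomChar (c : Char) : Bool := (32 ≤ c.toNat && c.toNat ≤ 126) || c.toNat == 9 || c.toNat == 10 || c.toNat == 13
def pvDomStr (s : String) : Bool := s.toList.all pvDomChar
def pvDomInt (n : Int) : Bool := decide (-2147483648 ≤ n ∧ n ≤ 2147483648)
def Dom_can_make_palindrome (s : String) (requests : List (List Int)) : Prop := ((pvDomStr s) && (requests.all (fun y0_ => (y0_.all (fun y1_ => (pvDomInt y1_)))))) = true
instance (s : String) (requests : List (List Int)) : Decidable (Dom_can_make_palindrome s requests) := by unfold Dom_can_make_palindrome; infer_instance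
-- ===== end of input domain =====

-- B drops A's precomputed list of prefix Counters and the per-query Counter subtraction:
-- each query is answered on its own by slicing the substring and counting the characters
-- occurring an odd number of times in it (objective: simpler).

-- ===== PORT A =====
-- collections.Counter.__add__, step for step: positive sums from self's items,
-- then positive counts of keys of other that are not in self.
def pvCounterAdd (a b : PySem.Dict Char Int) : PySem.Dict Char Int :=
  let r := a.items.foldl (fun (acc : PySem.Dict Char Int) kv =>
      let n := kv.2 + b.getD kv.1 0
      if 0 < n then acc.insert kv.1 n else acc) PySem.Dict.empty
  b.items.foldl (fun (acc : PySem.Dict Char Int) kv =>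
      if ¬ a.contains kv.1 ∧ 0 < kv.2 then acc.insert kv.1 kv.2 else acc) r

-- collections.Counter.__sub__, step for step.
def pvCounterSub (a b : PySem.Dict Char Int) : PySem.Dict Char Int :=
  let r := a.items.foldl (fun (acc : PySem.Dict Char Int) kv =>
      let n := kv.2 - b.getD kv.1 0
      if 0 < n then acc.insert kv.1 n else acc) PySem.Dict.empty
  b.items.foldl (fun (acc : PySem.Dict Char Int) kv =>
      if ¬ a.contains kv.1 ∧ kv.2 < 0 then acc.insert kv.1 (0 - kv.2) else acc) r

def can_make_palindrome (s : String) (requests : List (List Int)) : List Bool :=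
  let dp : List (PySem.Dict Char Int) :=
    (PySem.List.pyRange 0 (PySem.Str.len s) 1).foldl (fun dp i =>
      dp ++ [pvCounterAdd (PySem.List.pyGetD dp (-1) PySem.Dict.empty)
              (PySem.Dict.counter ((PySem.Str.pyGet? s i).elim [] (fun c => [c])))])
      [PySem.Dict.empty]
  requests.foldl (fun res req =>
    match req with
    | [l, r, k] =>
      let d := pvCounterSub (PySem.List.pyGetD dp (r + 1) PySem.Dict.empty)
                            (PySem.List.pyGetD dp l PySem.Dict.empty)
      let need := PySem.Int.floordiv ((d.values.map (fun v => PySem.Int.mod v 2)).sum) 2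
      res ++ [decide (need ≤ k)]
    | _ => res) []   -- unpacking a non-triple raises ValueError in Python; excluded by Pre_

-- ===== PORT B =====
-- one loop iteration of B: answer the query q = [l, r, k] on the slice s[l:r+1]
-- (the unpacking 'for l, r, k in requests' is exact on triples; on a non-triple Python
-- raises ValueError — such requests are excluded by Pre_)
def pvAltQuery (cs : List Char) (res : List Bool) (q : List Int) : List Bool :=
  let l := PySem.List.pyGetD q 0 0
  let r := PySem.List.pyGetD q 1 0
  let k := PySem.List.pyGetD q 2 0
  let sub := PySem.List.slice cs (some l) (some (r + 1))
  let odd := ((PySem.Set.ofList sub).map (fun c => PySem.Int.mod ((sub.count c : Nat) : Int) 2)).sum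
  res ++ [decide (PySem.Int.floordiv odd 2 ≤ k)]

def can_make_palindrome_alt (s : String) (requests : List (List Int)) : List Bool :=
  requests.foldl (pvAltQuery s.toList) []

-- ===== PRECONDITION & SPEC =====
-- Pre_ excludes requests that are not triples or whose indices l, r+1 fall outside A's n+1
-- prefix tables (A raises ValueError/IndexError there), and requests with a negative l or with
-- r+1 negative, which lie outside the problem's domain 0 ≤ l, 0 ≤ r+1 ≤ n: on those A indexes
-- its prefix tables from the end while B takes Python's slice reading — two equally
-- unspecified readings of a query no caller would pose.
def Pre_can_make_palindrome (s : String) (requests : List (List Int)) : Prop :=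
  ∀ req ∈ requests, req.length = 3 ∧
    0 ≤ req.getD 0 0 ∧ req.getD 0 0 ≤ (s.toList.length : Int) ∧
    0 ≤ req.getD 1 0 + 1 ∧ req.getD 1 0 + 1 ≤ (s.toList.length : Int)
instance (s : String) (requests : List (List Int)) : Decidable (Pre_can_make_palindrome s requests) := by
  unfold Pre_can_make_palindrome; infer_instance

def pvWitness_can_make_palindrome : String × List (List Int) := ("ab", [[0, 1, 1]])

def Spec_can_make_palindrome (s : String) (requests : List (List Int)) (out : List Bool) : Prop := out = can_make_palindrome_alt s requests
instance (s : String) (requests : List (List Int)) (out : List Bool) : Decidable (Spec_can_make_palindrome s requests out) := by unfold Spec_can_make_palindrome; infer_instance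

-- ===== CLAIM (what is proved, stated in full; the proofs are below) =====
def Claim_equal_can_make_palindrome : Prop := ∀ (s : String) (requests : List (List Int)), Dom_can_make_palindrome s requests → Pre_can_make_palindrome s requests → Spec_can_make_palindrome s requests (can_make_palindrome s requests)

-- ===== LEMMAS AND PROOFS =====

-- the common reference value: number of distinct characters of s[:m] occurring an odd
-- number of times in s[l:m]
def pvRef (cs : List Char) (l m : Nat) : Nat :=
  (PySem.Set.ofList (cs.take m)).countP (fun k => decide (((cs.take m).drop l).count k % 2 = 1))

-- ---------- generic small lemmas ----------

lemma pv_nodup_countP_eq {α : Type} [DecidableEq α] (l1 l2 : List α) (p : α → Bool)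
    (h1 : l1.Nodup) (h2 : l2.Nodup) (hm : ∀ a, p a → (a ∈ l1 ↔ a ∈ l2)) :
    l1.countP p = l2.countP p := by
  rw [List.countP_eq_length_filter, List.countP_eq_length_filter]
  apply List.Perm.length_eq
  rw [List.perm_ext_iff_of_nodup (h1.filter p) (h2.filter p)]
  intro a
  simp only [List.mem_filter]
  constructor
  · rintro ⟨ha, hp⟩; exact ⟨(hm a hp).mp ha, hp⟩
  · rintro ⟨ha, hp⟩; exact ⟨(hm a hp).mpr ha, hp⟩

-- ---------- A-side: Counter helper lemmas ----------

lemma pv_items_counter_single (c : Char) :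
    (PySem.Dict.counter [c]).items = [(c, (1 : Int))] := by
  rw [PySem.Dict.items_counter]
  simp [PySem.Set.ofList]

lemma pv_mem_counter_items (xs : List Char) (kv : Char × Int)
    (hkv : kv ∈ (PySem.Dict.counter xs).items) : kv.1 ∈ xs ∧ kv.2 = (xs.count kv.1 : Int) := by
  rw [PySem.Dict.items_counter] at hkv
  rcases List.mem_map.mp hkv with ⟨k, hk, hkeq⟩
  have hmem : k ∈ xs := (PySem.Set.mem_ofList xs k).mp hk
  cases hkeq; exact ⟨hmem, rfl⟩

lemma pv_ofList_append_mem (xs : List Char) (c : Char) (h : c ∈ xs) :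
    PySem.Set.ofList (xs ++ [c]) = PySem.Set.ofList xs := by
  rw [PySem.Set.ofList_eq_foldl, List.foldl_append, ← PySem.Set.ofList_eq_foldl]
  show PySem.Set.add (PySem.Set.ofList xs) c = PySem.Set.ofList xs
  unfold PySem.Set.add
  rw [if_pos]
  simp [PySem.Set.contains]
  exact h

lemma pv_ofList_append_not_mem (xs : List Char) (c : Char) (h : c ∉ xs) :
    PySem.Set.ofList (xs ++ [c]) = PySem.Set.ofList xs ++ [c] := by
  rw [PySem.Set.ofList_eq_foldl, List.foldl_append, ← PySem.Set.ofList_eq_foldl]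
  show PySem.Set.add (PySem.Set.ofList xs) c = PySem.Set.ofList xs ++ [c]
  unfold PySem.Set.add
  rw [if_neg]
  simp [PySem.Set.contains]
  exact h

lemma pv_counterAdd_single (xs : List Char) (c : Char) :
    pvCounterAdd (PySem.Dict.counter xs) (PySem.Dict.counter [c]) = PySem.Dict.counter (xs ++ [c]) := by
  unfold pvCounterAdd
  have h1 : (PySem.Dict.counter xs).items.foldl (fun (acc : PySem.Dict Char Int) kv =>
        let n := kv.2 + (PySem.Dict.counter [c]).getD kv.1 0
        if 0 < n then acc.insert kv.1 n else acc) PySem.Dict.empty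
      = (PySem.Dict.counter xs).items.foldl (fun (acc : PySem.Dict Char Int) kv =>
        acc.insert kv.1 (((xs ++ [c]).count kv.1 : Int))) PySem.Dict.empty := by
    apply PySem.List.foldl_congr_mem
    intro acc kv hkv
    obtain ⟨hmem, hval⟩ := pv_mem_counter_items xs kv hkv
    have hcnt : 1 ≤ xs.count kv.1 := List.one_le_count_iff.mpr hmem
    have hgd : (PySem.Dict.counter [c]).getD kv.1 0 = ([c].count kv.1 : Int) :=
      PySem.Dict.getD_counter [c] kv.1
    have hca : (xs ++ [c]).count kv.1 = xs.count kv.1 + [c].count kv.1 := List.count_append ..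
    have hpos : 0 < kv.2 + (PySem.Dict.counter [c]).getD kv.1 0 := by
      rw [hgd, hval]
      have : (0:Int) ≤ ([c].count kv.1 : Int) := Int.natCast_nonneg _
      omega
    simp only []
    rw [if_pos hpos, hgd, hval, hca]
    push_cast
    ring_nf
  rw [h1]
  have hfresh := PySem.Dict.items_foldl_insert_fresh
    (l := (PySem.Dict.counter xs).items) (d := PySem.Dict.empty)
    (k := fun kv => kv.1)
    (v := fun kv => (((xs ++ [c]).count kv.1 : Int)))
    (by intro a _; exact PySem.Dict.contains_empty _)
    (by
      have : (PySem.Dict.counter xs).items.map (fun kv => kv.1) = (PySem.Dict.counter xs).keys := rfl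
      rw [this]; exact PySem.Dict.nodup_keys_counter xs)
  set r := (PySem.Dict.counter xs).items.foldl (fun (acc : PySem.Dict Char Int) kv =>
        acc.insert kv.1 (((xs ++ [c]).count kv.1 : Int))) PySem.Dict.empty with hr
  have hitems : r.items = (PySem.Set.ofList xs).map (fun k => (k, ((xs ++ [c]).count k : Int))) := by
    rw [hr, hfresh, PySem.Dict.items_counter]
    simp [List.map_map, Function.comp, List.count_append, PySem.Dict.empty]
  have hkeys : r.keys = PySem.Set.ofList xs := by
    show r.items.map (·.1) = _
    rw [hitems, List.map_map]
    simp [Function.comp_def]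
  rw [pv_items_counter_single]
  simp only [List.foldl_cons, List.foldl_nil]
  by_cases hmem : c ∈ xs
  · rw [if_neg (by
      rw [PySem.Dict.contains_counter]
      simp [hmem])]
    apply PySem.Dict.ext
    rw [hitems, PySem.Dict.items_counter, pv_ofList_append_mem xs c hmem]
  · rw [if_pos ⟨by rw [PySem.Dict.contains_counter]; simp [hmem], by norm_num⟩]
    apply PySem.Dict.ext
    have hcont : r.contains c = false := by
      rw [PySem.Dict.contains_eq_decide_mem_keys, hkeys]
      simp
      intro hc
      exact hmem hc
    rw [PySem.Dict.items_insert_of_not_contains (h := hcont), hitems,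
        PySem.Dict.items_counter, pv_ofList_append_not_mem xs c hmem, List.map_append]
    have hc1 : ((xs ++ [c]).count c : Int) = 1 := by
      rw [List.count_append]
      rw [List.count_eq_zero.mpr hmem]
      simp
    simp
    exact List.count_eq_zero.mpr hmem

lemma pv_dp_aux (cs : List Char) (n : Nat) (hn : n ≤ cs.length) :
    (List.range n).foldl (fun dp (i : Nat) =>
        dp ++ [pvCounterAdd (PySem.List.pyGetD dp (-1) PySem.Dict.empty)
               (PySem.Dict.counter ((PySem.List.pyGet? cs (i : Int)).elim [] (fun c => [c])))])
      [PySem.Dict.empty]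
    = (List.range (n+1)).map (fun j => PySem.Dict.counter (cs.take j)) := by
  induction n with
  | zero => simp [PySem.Dict.counter]
  | succ n ih =>
    have hn' : n ≤ cs.length := Nat.le_of_succ_le hn
    rw [List.range_succ, List.foldl_append, ih hn']
    simp only [List.foldl_cons, List.foldl_nil]
    have hlast : PySem.List.pyGetD ((List.range (n+1)).map (fun j => PySem.Dict.counter (cs.take j))) (-1) PySem.Dict.empty
        = PySem.Dict.counter (cs.take n) := by
      rw [List.range_succ, List.map_append]
      exact PySem.List.pyGetD_neg_one_append_singleton ..
    have hget : PySem.List.pyGet? cs ((n : Nat) : Int) = some cs[n] := by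
      rw [PySem.List.pyGet?_natCast]
      exact List.getElem?_eq_getElem (by omega)
    rw [hlast, hget]
    simp only [Option.elim]
    rw [pv_counterAdd_single]
    have htake : cs.take n ++ [cs[n]] = cs.take (n+1) := by
      rw [List.take_add_one]
      simp [List.getElem?_eq_getElem (show n < cs.length by omega)]
    rw [htake]
    rw [show List.range (n+1+1) = List.range (n+1) ++ [n+1] from List.range_succ, List.map_append]
    simp

lemma pv_dp_build (s : String) :
    (PySem.List.pyRange 0 (PySem.Str.len s) 1).foldl (fun dp i =>
      dp ++ [pvCounterAdd (PySem.List.pyGetD dp (-1) PySem.Dict.empty)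
              (PySem.Dict.counter ((PySem.Str.pyGet? s i).elim [] (fun c => [c])))])
      [PySem.Dict.empty]
    = (List.range (s.toList.length + 1)).map (fun j => PySem.Dict.counter (s.toList.take j)) := by
  have hlen : PySem.Str.len s = (s.toList.length : Int) := by simp [pysem]
  rw [hlen, PySem.List.pyRange_zero_natCast, List.foldl_map]
  have hbody : ∀ (i : Nat),
      (PySem.Str.pyGet? s ((i : Nat) : Int)) = PySem.List.pyGet? s.toList (i : Int) := by
    intro i; simp [pysem]
  rw [show (fun (dp : List (PySem.Dict Char Int)) (i : Nat) =>
      dp ++ [pvCounterAdd (PySem.List.pyGetD dp (-1) PySem.Dict.empty)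
              (PySem.Dict.counter ((PySem.Str.pyGet? s (i : Int)).elim [] (fun c => [c])))])
    = (fun (dp : List (PySem.Dict Char Int)) (i : Nat) =>
      dp ++ [pvCounterAdd (PySem.List.pyGetD dp (-1) PySem.Dict.empty)
              (PySem.Dict.counter ((PySem.List.pyGet? s.toList (i : Int)).elim [] (fun c => [c])))]) by
    funext dp i; rw [hbody]]
  exact pv_dp_aux s.toList s.toList.length le_rfl

lemma pv_sub_values (xs ys : List Char) :
    (pvCounterSub (PySem.Dict.counter xs) (PySem.Dict.counter ys)).values
    = ((PySem.Set.ofList xs).filter (fun k => decide (ys.count k < xs.count k))).map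
        (fun k => ((xs.count k : Int) - (ys.count k : Int))) := by
  have e1 : pvCounterSub (PySem.Dict.counter xs) (PySem.Dict.counter ys)
      = (PySem.Dict.counter ys).items.foldl (fun (acc : PySem.Dict Char Int) kv =>
          if ¬ (PySem.Dict.counter xs).contains kv.1 ∧ kv.2 < 0 then acc.insert kv.1 (0 - kv.2) else acc)
          ((PySem.Dict.counter xs).items.foldl (fun (acc : PySem.Dict Char Int) kv =>
            if 0 < kv.2 - (PySem.Dict.counter ys).getD kv.1 0 then
              acc.insert kv.1 (kv.2 - (PySem.Dict.counter ys).getD kv.1 0) else acc) PySem.Dict.empty) := rfl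
  rw [e1]
  -- second loop is a no-op
  rw [PySem.List.foldl_congr_mem _ _ (fun acc _ => acc) _ (by
    intro acc kv hkv
    obtain ⟨hmem, hval⟩ := pv_mem_counter_items ys kv hkv
    have h1 : 1 ≤ ys.count kv.1 := List.one_le_count_iff.mpr hmem
    rw [if_neg]
    rintro ⟨-, hneg⟩
    rw [hval] at hneg
    omega)]
  rw [PySem.List.foldl_ignore]
  -- first loop: filter then fresh inserts
  rw [PySem.List.foldl_ite_eq_foldl_filter
    (p := fun kv : Char × Int => 0 < kv.2 - (PySem.Dict.counter ys).getD kv.1 0)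
    (f := fun (acc : PySem.Dict Char Int) kv =>
      acc.insert kv.1 (kv.2 - (PySem.Dict.counter ys).getD kv.1 0))]
  rw [PySem.List.foldl_congr_mem _ _ (fun (acc : PySem.Dict Char Int) (kv : Char × Int) =>
      acc.insert kv.1 ((xs.count kv.1 : Int) - (ys.count kv.1 : Int))) _ (by
    intro acc kv hkv
    have hkv' : kv ∈ (PySem.Dict.counter xs).items := List.mem_of_mem_filter hkv
    obtain ⟨hmem, hval⟩ := pv_mem_counter_items xs kv hkv'
    rw [PySem.Dict.getD_counter, hval])]
  have hfilter : ((PySem.Dict.counter xs).items.filter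
        (fun kv => decide (0 < kv.2 - (PySem.Dict.counter ys).getD kv.1 0)))
      = ((PySem.Set.ofList xs).filter (fun k => decide (ys.count k < xs.count k))).map
          (fun k => (k, (xs.count k : Int))) := by
    rw [PySem.Dict.items_counter, List.filter_map]
    congr 1
    apply List.filter_congr
    intro k _
    simp only [Function.comp]
    rw [PySem.Dict.getD_counter]
    simp only [decide_eq_decide]
    omega
  rw [hfilter]
  have hfresh := PySem.Dict.items_foldl_insert_fresh
    (l := ((PySem.Set.ofList xs).filter (fun k => decide (ys.count k < xs.count k))).map
          (fun k => (k, (xs.count k : Int))))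
    (d := PySem.Dict.empty)
    (k := fun kv => kv.1)
    (v := fun kv => ((xs.count kv.1 : Int) - (ys.count kv.1 : Int)))
    (by intro a _; exact PySem.Dict.contains_empty _)
    (by
      rw [List.map_map]
      simp only [Function.comp_def]
      rw [List.map_id']
      exact List.Nodup.filter _ (PySem.Set.nodup_ofList xs))
  show (_ : PySem.Dict Char Int).items.map (·.2) = _
  rw [hfresh]
  simp [List.map_map, Function.comp_def, PySem.Dict.empty]

lemma pv_sub_sum (xs ys : List Char) (hc : ∀ k, ys.count k ≤ xs.count k) :
    (((pvCounterSub (PySem.Dict.counter xs) (PySem.Dict.counter ys)).values.map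
        (fun v => PySem.Int.mod v 2)).sum)
    = ((PySem.Set.ofList xs).countP (fun k => decide ((xs.count k - ys.count k) % 2 = 1)) : Int) := by
  rw [pv_sub_values, List.map_map]
  set S := (PySem.Set.ofList xs).filter (fun k => decide (ys.count k < xs.count k)) with hS
  have hmapeq : S.map ((fun v => PySem.Int.mod v 2) ∘ (fun k => ((xs.count k : Int) - (ys.count k : Int))))
      = S.map (fun k => if decide ((xs.count k - ys.count k) % 2 = 1) = true then (1:Int) else 0) := by
    apply List.map_congr_left
    intro k hk
    have hlt : ys.count k < xs.count k := by
      have := List.of_mem_filter hk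
      simpa using this
    simp only [Function.comp]
    have hcast : ((xs.count k : Int) - (ys.count k : Int)) = ((xs.count k - ys.count k : Nat) : Int) := by
      omega
    rw [hcast]
    have hmod : PySem.Int.mod ((xs.count k - ys.count k : Nat) : Int) 2
        = (((xs.count k - ys.count k) % 2 : Nat) : Int) := by
      simp [pysem]
    rw [hmod]
    rcases Nat.mod_two_eq_zero_or_one (xs.count k - ys.count k) with h|h <;> simp [h]
  rw [hmapeq, PySem.List.sum_map_ite_one_zero]
  congr 1
  rw [hS, List.countP_filter]
  apply List.countP_congr
  intro k _
  by_cases hodd : (xs.count k - ys.count k) % 2 = 1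
  · have : ys.count k < xs.count k := by
      have := hc k; omega
    simp [hodd, this]
  · simp [hodd]

lemma pv_take_prefix (cs : List Char) (l m : Nat) (h : l ≤ m) : cs.take l <+: cs.take m := by
  have : (cs.take m).take l = cs.take l := by
    rw [List.take_take]; simp [Nat.min_eq_left h]
  rw [← this]
  exact List.take_prefix ..

lemma pv_count_split (cs : List Char) (l m : Nat) (h : l ≤ m) (k : Char) :
    (cs.take m).count k = (cs.take l).count k + ((cs.take m).drop l).count k := by
  conv_lhs => rw [show cs.take m = (cs.take m).take l ++ (cs.take m).drop l from (List.take_append_drop ..).symm]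
  rw [List.count_append, List.take_take]
  simp [Nat.min_eq_left h]

lemma pv_A_query (cs : List Char) (l m : Nat) (hlm : l ≤ m) :
    (((pvCounterSub (PySem.Dict.counter (cs.take m)) (PySem.Dict.counter (cs.take l))).values.map
        (fun v => PySem.Int.mod v 2)).sum) = (pvRef cs l m : Int) := by
  have hc : ∀ k, (cs.take l).count k ≤ (cs.take m).count k :=
    fun k => (pv_take_prefix cs l m hlm).sublist.count_le k
  rw [pv_sub_sum _ _ hc]
  unfold pvRef
  congr 1
  apply List.countP_congr
  intro k _
  have := pv_count_split cs l m hlm k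
  simp only [decide_eq_true_eq]
  omega

-- inverted range: every count of the shorter prefix is dominated, Counter subtraction clamps to empty
lemma pv_A_query_empty (cs : List Char) (l m : Nat) (hml : m ≤ l) :
    (((pvCounterSub (PySem.Dict.counter (cs.take m)) (PySem.Dict.counter (cs.take l))).values.map
        (fun v => PySem.Int.mod v 2)).sum) = 0 := by
  rw [pv_sub_values]
  have hfil : ((PySem.Set.ofList (cs.take m)).filter
      (fun k => decide ((cs.take l).count k < (cs.take m).count k))) = [] := by
    apply List.filter_eq_nil_iff.mpr
    intro k _
    simp only [decide_eq_true_eq, not_lt]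
    exact (pv_take_prefix cs m l hml).sublist.count_le k
  rw [hfil]
  simp

-- ---------- B-side lemmas ----------

-- sum of count%2 over the distinct elements = number of distinct elements with odd count
lemma pv_B_sum (mid : List Char) :
    ((PySem.Set.ofList mid).map (fun c => PySem.Int.mod ((mid.count c : Nat) : Int) 2)).sum
    = ((PySem.Set.ofList mid).countP (fun k => decide (mid.count k % 2 = 1)) : Int) := by
  have hmapeq : (PySem.Set.ofList mid).map (fun c => PySem.Int.mod ((mid.count c : Nat) : Int) 2)
      = (PySem.Set.ofList mid).map (fun k => if decide (mid.count k % 2 = 1) = true then (1:Int) else 0) := by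
    apply List.map_congr_left
    intro k _
    have hmod : PySem.Int.mod ((mid.count k : Nat) : Int) 2 = ((mid.count k % 2 : Nat) : Int) := by
      simp [pysem]
    rw [hmod]
    rcases Nat.mod_two_eq_zero_or_one (mid.count k) with h|h <;> simp [h]
  rw [hmapeq, PySem.List.sum_map_ite_one_zero]

-- counting odd-count distinct characters over the slice equals counting them over the prefix
lemma pv_mid_ref (cs : List Char) (l m : Nat) :
    (PySem.Set.ofList ((cs.take m).drop l)).countP
        (fun k => decide (((cs.take m).drop l).count k % 2 = 1)) = pvRef cs l m := by
  unfold pvRef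
  set mid := (cs.take m).drop l with hmid
  apply pv_nodup_countP_eq _ _ _ (PySem.Set.nodup_ofList mid) (PySem.Set.nodup_ofList (cs.take m))
  intro a hp
  have hodd : mid.count a % 2 = 1 := by simpa using hp
  have hmem : a ∈ mid := by
    rw [← List.one_le_count_iff]
    omega
  constructor
  · intro _; exact (PySem.Set.mem_ofList _ a).mpr (List.drop_subset _ _ hmem)
  · intro _; exact (PySem.Set.mem_ofList _ a).mpr hmem

-- Python indexing into the n+1 prefix tables at a non-negative index
lemma pv_pyGetD_map_range {α : Type} (n : Nat) (f : Nat → α) (i : Int) (d : α)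
    (h1 : 0 ≤ i) (h2 : i ≤ (n : Int)) :
    PySem.List.pyGetD ((List.range (n+1)).map f) i d = f i.toNat := by
  have hlt : i < (((List.range (n+1)).map f).length : Int) := by
    simp; omega
  rw [PySem.List.pyGetD_eq_getElem (h0 := h1) (h1 := hlt)]
  simp

-- ===== VERDICT (by name: the statement is the Claim_ definition above) =====
theorem can_make_palindrome_spec : Claim_equal_can_make_palindrome := by
  intro s requests hdom hpre
  show can_make_palindrome s requests = can_make_palindrome_alt s requests
  unfold can_make_palindrome can_make_palindrome_alt pvAltQuery
  simp only [pv_dp_build]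
  apply PySem.List.foldl_congr_mem
  intro acc req hreq
  obtain ⟨hlen, hl0, hln, hr0, hrn⟩ := hpre req hreq
  match req, hlen with
  | [l, r, k], _ =>
    dsimp only
    have hq0 : PySem.List.pyGetD [l, r, k] (0:Int) 0 = l := by simp [pysem]
    have hq1 : PySem.List.pyGetD [l, r, k] (1:Int) 0 = r := by simp [pysem]
    have hq2 : PySem.List.pyGetD [l, r, k] (2:Int) 0 = k := by simp [pysem]
    simp only [hq0, hq1, hq2]
    simp only [List.getD, List.getElem?_cons_zero, List.getElem?_cons_succ,
      Option.getD_some] at hl0 hln hr0 hrn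
    set n := s.toList.length with hn
    have hlcast : l = ((l.toNat : Nat) : Int) := by omega
    have hmcast : r + 1 = ((r + 1).toNat : Nat) := by omega
    rw [pv_pyGetD_map_range n (fun j => PySem.Dict.counter (s.toList.take j)) (r+1) PySem.Dict.empty (by omega) (by omega),
        pv_pyGetD_map_range n (fun j => PySem.Dict.counter (s.toList.take j)) l PySem.Dict.empty (by omega) (by omega)]
    conv_rhs => rw [hlcast, hmcast, PySem.List.slice_natCast]
    have hdt : (s.toList.drop l.toNat).take ((r+1).toNat - l.toNat)
        = (s.toList.take ((r+1).toNat)).drop l.toNat := by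
      rw [List.drop_take]
    rw [hdt, pv_B_sum]
    by_cases hlm : l.toNat ≤ (r+1).toNat
    · rw [pv_A_query s.toList l.toNat (r+1).toNat hlm, pv_mid_ref s.toList l.toNat (r+1).toNat]
    · -- inverted range: both sides count an empty slice
      rw [pv_A_query_empty s.toList l.toNat (r+1).toNat (by omega)]
      have hmid : (s.toList.take ((r+1).toNat)).drop l.toNat = [] := by
        apply List.drop_eq_nil_of_le
        have := List.length_take_le ((r+1).toNat) s.toList
        omega
      rw [hmid]
      simp [PySem.Set.ofList]
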